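-- pv_equiv track=rewrite | github.com/nataliegref/PolEvol | May23polevol.py | new_daughter_seq
-- ===== SOURCE A (Python) =====
-- def new_daughter_seq(l, index):
--     new_seq = ''
--     for i in range(len(l)):
--         if i == index:
--             new_seq += 'x'*len(l[i])
--         else:
--             new_seq += l[i]
--
--     return new_seq
-- ===== SOURCE B (Python) =====
-- def new_daughter_seq(l, index):
--     if 0 <= index < len(l):
--         return ''.join(l[:index]) + 'x' * len(l[index]) + ''.join(l[index + 1:])
--     return ''.join(l)
-- ===== Notes on version B (the rewrite author's own statement) =====
-- stated objective: alternative
-- what changed: Replaces the per-index loop with a branching append by a guarded slice-based construction: join the prefix, emit an 'x'-block for the replaced element, join the suffix (or join everything when the index is out of range).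
import Mathlib
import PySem

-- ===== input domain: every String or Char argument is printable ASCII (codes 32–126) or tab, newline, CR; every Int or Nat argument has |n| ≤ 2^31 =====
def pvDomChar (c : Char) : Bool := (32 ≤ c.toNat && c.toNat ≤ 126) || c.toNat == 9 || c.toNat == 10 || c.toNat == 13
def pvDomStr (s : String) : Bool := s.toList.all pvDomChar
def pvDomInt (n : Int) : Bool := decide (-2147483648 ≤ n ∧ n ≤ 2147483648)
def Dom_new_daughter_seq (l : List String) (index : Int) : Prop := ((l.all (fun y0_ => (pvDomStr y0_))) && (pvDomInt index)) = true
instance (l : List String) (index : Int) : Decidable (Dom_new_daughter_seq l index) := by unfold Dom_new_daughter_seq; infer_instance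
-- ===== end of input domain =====

-- B replaces A's per-index loop with a per-element branch by a guarded slice-based
-- construction (join prefix + 'x'-block + join suffix); objective: alternative decomposition.

-- 'x'*len(s) — exact: len(s) is the number of code points of s
def xRep (s : String) : String := String.ofList (List.replicate s.toList.length 'x')

-- ===== PORT A =====
def new_daughter_seq (l : List String) (index : Int) : String :=
  (PySem.List.pyRange 0 (PySem.List.len l) 1).foldl
    (fun new_seq i =>
      if i == index then new_seq ++ xRep (PySem.List.pyGetD l i "")
      else new_seq ++ PySem.List.pyGetD l i "")
    ""

-- ===== PORT B =====
def new_daughter_seq_alt (l : List String) (index : Int) : String :=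
  if 0 ≤ index ∧ index < PySem.List.len l then
    PySem.Str.join "" (PySem.List.slice l none (some index))
      ++ xRep (PySem.List.pyGetD l index "")
      ++ PySem.Str.join "" (PySem.List.slice l (some (index + 1)) none)
  else
    PySem.Str.join "" l

-- ===== PRECONDITION & SPEC =====
def Spec_new_daughter_seq (l : List String) (index : Int) (out : String) : Prop := out = new_daughter_seq_alt l index
instance (l : List String) (index : Int) (out : String) : Decidable (Spec_new_daughter_seq l index out) := by unfold Spec_new_daughter_seq; infer_instance

-- ===== CLAIM (what is proved, stated in full; the proofs are below) =====
def Claim_equal_new_daughter_seq : Prop := ∀ (l : List String) (index : Int), Dom_new_daughter_seq l index → Spec_new_daughter_seq l index (new_daughter_seq l index)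

-- ===== LEMMAS AND PROOFS =====

-- common recursive characterisation of both ports, at the List Char level
def xsOf (l : List String) (index : Int) : List Char :=
  match l with
  | [] => []
  | s :: t => (if index = 0 then List.replicate s.toList.length 'x' else s.toList) ++ xsOf t (index - 1)

theorem toList_foldl_append (g : Int → String) (r : List Int) (acc : String) :
    (r.foldl (fun a i => a ++ g i) acc).toList = r.foldl (fun a i => a ++ (g i).toList) acc.toList := by
  induction r generalizing acc with
  | nil => rfl
  | cons x xs ih => simp only [List.foldl]; rw [ih]; simp [String.toList_append]

theorem join_empty_toList (parts : List String) :
    (PySem.Str.join "" parts).toList = (parts.map String.toList).flatten := by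
  rw [PySem.Str.toList_join]
  show PySem.Chars.join ([] : List Char) _ = _
  induction parts with
  | nil => simp [PySem.Chars.join_nil]
  | cons p rest ih =>
    cases rest with
    | nil => simp [PySem.Chars.join, List.intercalate]
    | cons q t =>
      rw [show (List.map String.toList (p :: q :: t)) = p.toList :: q.toList :: List.map String.toList t from rfl,
          PySem.Chars.join_cons_cons]
      simp only [List.map, List.flatten_cons] at ih ⊢
      rw [List.append_nil, ih]

theorem flat_range_eq_xsOf (l : List String) (index : Int) :
    (List.range l.length).flatMap
      (fun k : Nat => (if (k : Int) == index then xRep (l.getD k "") else l.getD k "").toList)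
      = xsOf l index := by
  induction l generalizing index with
  | nil => rfl
  | cons s t ih =>
    rw [show (s :: t).length = t.length + 1 from rfl, List.range_succ_eq_map,
        List.flatMap_cons, List.flatMap_map]
    have hfun : (fun k : Nat =>
        (if ((Nat.succ k : Nat) : Int) == index then xRep ((s :: t).getD (Nat.succ k) "")
         else (s :: t).getD (Nat.succ k) "").toList)
        = (fun k : Nat => (if (k : Int) == (index - 1) then xRep (t.getD k "") else t.getD k "").toList) := by
      funext k
      have hcond : (((Nat.succ k : Nat) : Int) == index) = ((k : Int) == (index - 1)) := by
        rw [Bool.eq_iff_iff]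
        simp only [beq_iff_eq]
        push_cast
        omega
      rw [hcond, List.getD_cons_succ]
    rw [hfun, ih]
    rw [show xsOf (s :: t) index =
        (if index = 0 then List.replicate s.toList.length 'x' else s.toList) ++ xsOf t (index - 1) from rfl]
    rw [List.getD_cons_zero]
    by_cases h : index = 0
    · subst h; simp [xRep]
    · rw [if_neg (by simp only [beq_iff_eq, Nat.cast_zero]; exact fun he => h he.symm : ¬ (((0:Nat):Int) == index) = true), if_neg h]

theorem A_eq_xsOf (l : List String) (index : Int) :
    (new_daughter_seq l index).toList = xsOf l index := by
  unfold new_daughter_seq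
  rw [show (fun new_seq i =>
      if i == index then new_seq ++ xRep (PySem.List.pyGetD l i "")
      else new_seq ++ PySem.List.pyGetD l i "") =
    (fun (new_seq : String) (i : Int) => new_seq ++
      (if i == index then xRep (PySem.List.pyGetD l i "") else PySem.List.pyGetD l i "")) from by
    funext a i; split <;> rfl]
  rw [toList_foldl_append, PySem.List.foldl_append_eq_flatMap, PySem.List.len_eq,
      PySem.List.pyRange_zero_nat, List.flatMap_map]
  rw [show (fun k : Nat =>
      (if ((k : Int)) == index then xRep (PySem.List.pyGetD l (k : Int) "")
       else PySem.List.pyGetD l (k : Int) "").toList)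
      = (fun k : Nat => (if (k : Int) == index then xRep (l.getD k "") else l.getD k "").toList) from by
    funext k; rw [PySem.List.pyGetD_natCast]]
  rw [flat_range_eq_xsOf]
  rfl

theorem xsOf_out (l : List String) (index : Int) (h : index < 0 ∨ (l.length : Int) ≤ index) :
    xsOf l index = (l.map String.toList).flatten := by
  induction l generalizing index with
  | nil => rfl
  | cons s t ih =>
    unfold xsOf
    have hl : (((s :: t).length : Nat) : Int) = (t.length : Int) + 1 := by push_cast [List.length_cons]; ring
    rw [hl] at h
    have hne : ¬ index = 0 := by rcases h with h | h <;> omega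
    rw [if_neg hne, ih (index - 1) (by rcases h with h | h <;> [left; right] <;> omega)]
    simp

theorem xsOf_in (l : List String) (i : Nat) (hi : i < l.length) :
    xsOf l (i : Int) = ((l.take i).map String.toList).flatten
      ++ List.replicate (l[i].toList.length) 'x'
      ++ ((l.drop (i + 1)).map String.toList).flatten := by
  induction l generalizing i with
  | nil => simp at hi
  | cons s t ih =>
    cases i with
    | zero =>
      simp only [Nat.cast_zero]
      unfold xsOf
      rw [if_pos rfl]
      rw [xsOf_out t ((0 : Int) - 1) (by left; omega)]
      simp
    | succ i =>
      unfold xsOf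
      rw [if_neg (by push_cast; omega)]
      have : ((i + 1 : Nat) : Int) - 1 = (i : Int) := by omega
      rw [this, ih i (by simpa using hi)]
      simp [List.append_assoc]

theorem B_eq_xsOf (l : List String) (index : Int) :
    (new_daughter_seq_alt l index).toList = xsOf l index := by
  unfold new_daughter_seq_alt
  rw [PySem.List.len_eq]
  split
  · rename_i h
    rw [PySem.List.slice_to l h.1, PySem.List.slice_from l (by omega : (0:Int) ≤ index + 1),
        PySem.List.pyGetD_eq_getElem l "" h.1 h.2]
    have hidx : index = ((index.toNat : Nat) : Int) := (Int.toNat_of_nonneg h.1).symm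
    have h1 : (index + 1).toNat = index.toNat + 1 := by omega
    rw [h1]
    simp only [String.toList_append, join_empty_toList, xRep, String.toList_ofList]
    rw [show xsOf l index = xsOf l ((index.toNat : Nat) : Int) from by rw [← hidx]]
    rw [xsOf_in l index.toNat (by omega)]
  · rename_i h
    rw [join_empty_toList, xsOf_out l index (by omega)]

-- ===== VERDICT (by name: the statement is the Claim_ definition above) =====
theorem new_daughter_seq_spec : Claim_equal_new_daughter_seq := by
  intro l index _
  show new_daughter_seq l index = new_daughter_seq_alt l index
  rw [← String.toList_inj, A_eq_xsOf, B_eq_xsOf]
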